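-- pv_equiv track=rewrite | github.com/RemiErr/2026-python | weeks/week-07/solutions/1111405012/question-10062-easy.py | solve
-- ===== SOURCE A (Python) =====
-- class Fenwick:
--     """記錄每個牛號現在還在不在。"""
--
--     def __init__(self, n: int) -> None:
--         self.n = n
--         self.bit = [0] * (n + 1)
--
--     def add(self, i: int, value: int) -> None:
--         while i <= self.n:
--             self.bit[i] += value
--             i += i & -i
--
--     def pick_kth(self, k: int) -> int:
--         """把目前第 k 小的牛號找出來。"""
--         i = 0
--         step = 1 << (self.n.bit_length() - 1)
--
--         while step:
--             nxt = i + step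
--             if nxt <= self.n and self.bit[nxt] < k:
--                 k -= self.bit[nxt]
--                 i = nxt
--             step >>= 1
--
--         return i + 1
--
-- def solve(data: str) -> str:
--     parts = data.split()
--     if not parts:
--         return ""
--
--     n = int(parts[0])
--     before = [0] + [int(x) for x in parts[1:1 + max(0, n - 1)]]
--
--     tree = Fenwick(n)
--     for number in range(1, n + 1):
--         tree.add(number, 1)
--
--     answer = [0] * n
--
--     # 倒著做，因為最後一個位置剩下哪些牛號最清楚。
--     for pos in range(n - 1, -1, -1):
--         order = before[pos] + 1
--         answer[pos] = tree.pick_kth(order)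
--         tree.add(answer[pos], -1)
--
--     return "\n".join(str(x) for x in answer)
-- ===== SOURCE B (Python) =====
-- def solve(data: str) -> str:
--     parts = data.split()
--     if not parts:
--         return ""
--     n = int(parts[0])
--     before = [0] + [int(x) for x in parts[1:1 + max(0, n - 1)]]
--     available = list(range(1, n + 1))
--     picked = []
--     for pos in range(n - 1, -1, -1):
--         picked.append(available.pop(before[pos]))
--     return "\n".join(str(x) for x in reversed(picked))
-- ===== Notes on version B (the rewrite author's own statement) =====
-- stated objective: simpler
-- what changed: The Fenwick tree with its k-th order-statistic binary descent is replaced by a plain sorted list of still-available cow numbers from which each position's answer is removed with available.pop(before[pos]); parsing and the back-to-front position loop are kept.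
-- outside the precondition, e.g. on solve('2 5'): A returns '1\n3', B raises IndexError; on solve('2 -1'): A returns '2\n1', B returns '1\n2'
import Mathlib
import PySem

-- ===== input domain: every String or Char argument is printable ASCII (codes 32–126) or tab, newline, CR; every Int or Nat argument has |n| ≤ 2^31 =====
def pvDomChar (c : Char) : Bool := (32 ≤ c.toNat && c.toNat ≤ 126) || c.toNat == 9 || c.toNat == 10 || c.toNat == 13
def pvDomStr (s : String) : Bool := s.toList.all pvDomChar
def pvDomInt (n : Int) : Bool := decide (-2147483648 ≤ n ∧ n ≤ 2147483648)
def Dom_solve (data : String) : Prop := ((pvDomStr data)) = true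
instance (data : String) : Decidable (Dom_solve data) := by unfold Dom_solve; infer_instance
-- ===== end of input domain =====

-- B replaces A's Fenwick tree by a plain sorted list of the still-available cow numbers
-- (available.pop(before[pos])), keeping the parsing and the back-to-front loop: simpler, not faster.

-- ===== PORT A =====

-- Fenwick.add: 'while i <= self.n: self.bit[i] += value; i += i & -i'
-- (the 0 < lowbit guard only makes the loop total; A always calls add with i ≥ 1, where i & -i ≥ 1)
def fenAdd (n : Int) (bit : List Int) (i v : Int) : List Int :=
  if _h1 : i ≤ n then
    if _h2 : 0 < PySem.Int.band i (-i) then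
      fenAdd n (PySem.List.pySetD bit i (PySem.List.pyGetD bit i 0 + v)) (i + PySem.Int.band i (-i)) v
    else bit
  else bit
termination_by (n + 1 - i).toNat
decreasing_by omega

-- the 'while step:' loop of Fenwick.pick_kth
def fenPickGo (n : Int) (bit : List Int) (step : Nat) (i k : Int) : Int :=
  if _h : step = 0 then i + 1
  else
    let nxt := i + step
    if nxt ≤ n ∧ PySem.List.pyGetD bit nxt 0 < k then
      fenPickGo n bit (step / 2) nxt (k - PySem.List.pyGetD bit nxt 0)
    else fenPickGo n bit (step / 2) i k
termination_by step
decreasing_by all_goals exact Nat.div_lt_self (Nat.pos_of_ne_zero _h) (by norm_num)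

-- Fenwick.pick_kth: step = 1 << (self.n.bit_length() - 1)  (A only calls it with n ≥ 1)
def fenPick (n : Int) (bit : List Int) (k : Int) : Int :=
  fenPickGo n bit (1 <<< (PySem.Int.bitLength n - 1)) 0 k

-- one iteration of A's 'for pos in range(n-1, -1, -1)' loop; state = (tree.bit, answer)
def stepA (n : Int) (before : List Int) (st : List Int × List Int) (pos : Int) : List Int × List Int :=
  let order := PySem.List.pyGetD before pos 0 + 1
  let a := fenPick n st.1 order
  (fenAdd n st.1 a (-1), PySem.List.pySetD st.2 pos a)

def solve (data : String) : String :=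
  let parts := PySem.Str.split₀ data
  if parts = [] then ""
  else
    -- int(parts[0]) and the int(x) of the comprehension: Pre_solve guarantees every parse succeeds
    let n : Int := (PySem.Int.ofStr? (parts.getD 0 "")).getD 0
    let before : List Int :=
      0 :: (PySem.List.slice parts (some 1) (some (1 + max 0 (n - 1)))).map
        (fun s => (PySem.Int.ofStr? s).getD 0)
    let bit := (PySem.List.pyRange 1 (n + 1) 1).foldl (fun b number => fenAdd n b number 1)
      (List.replicate (n + 1).toNat 0)
    let st := (PySem.List.pyRange (n - 1) (-1) (-1)).foldl (stepA n before)
      (bit, List.replicate n.toNat 0)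
    PySem.Str.join "\n" (st.2.map PySem.Int.toStr)

-- ===== PORT B =====

-- one iteration of B's loop; state = (available, picked); Python raises IndexError where pop? is none
-- (outside Pre_solve), so that branch leaves the state unchanged
def stepB (before : List Int) (st : List Int × List Int) (pos : Int) : List Int × List Int :=
  match PySem.List.pop? st.1 (PySem.List.pyGetD before pos 0) with
  | some (x, rest) => (rest, st.2 ++ [x])
  | none => (st.1, st.2)

def solve_alt (data : String) : String :=
  let parts := PySem.Str.split₀ data
  if parts = [] then ""
  else
    let n : Int := (PySem.Int.ofStr? (parts.getD 0 "")).getD 0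
    let before : List Int :=
      0 :: (PySem.List.slice parts (some 1) (some (1 + max 0 (n - 1)))).map
        (fun s => (PySem.Int.ofStr? s).getD 0)
    let st := (PySem.List.pyRange (n - 1) (-1) (-1)).foldl (stepB before)
      (PySem.List.pyRange 1 (n + 1) 1, ([] : List Int))
    PySem.Str.join "\n" (st.2.reverse.map PySem.Int.toStr)

-- ===== PRECONDITION & SPEC =====

-- Pre_solve excludes inputs on which A raises (first token or a needed count token not an int,
-- fewer than n tokens: ValueError/IndexError) and malformed instances whose 'fewer-before' count
-- at position pos lies outside [0, pos]: there A silently returns garbage from an out-of-range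
-- Fenwick descent (or from order 0) while B's list.pop raises IndexError or pops from the end.
def preB (data : String) : Bool :=
  let parts := PySem.Str.split₀ data
  parts.isEmpty ||
    (match PySem.Int.ofStr? (parts.getD 0 "") with
     | none => false
     | some n =>
       decide (n ≤ (parts.length : Int)) &&
       (PySem.List.pyRange 1 n 1).all (fun pos =>
         match PySem.Int.ofStr? (parts.getD pos.toNat "") with
         | none => false
         | some c => decide (0 ≤ c) && decide (c ≤ pos)))

def Pre_solve (data : String) : Prop := preB data = true
instance (data : String) : Decidable (Pre_solve data) := by unfold Pre_solve; infer_instance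

def pvWitness_solve : String := "4 0 1 1"

def Spec_solve (data : String) (out : String) : Prop := out = solve_alt data
instance (data : String) (out : String) : Decidable (Spec_solve data out) := by unfold Spec_solve; infer_instance

-- ===== CLAIM (what is proved, stated in full; the proofs are below) =====
def Claim_equal_solve : Prop := ∀ (data : String), Dom_solve data → Pre_solve data → Spec_solve data (solve data)

-- ===== LEMMAS AND PROOFS =====

-- lowbit over Nat
def lb (m : Nat) : Nat := m - (m &&& (m - 1))

lemma land_bit0_bit1 (a b : Nat) : 2*a &&& (2*b+1) = 2*(a &&& b) := by
  have h := Nat.bitwise_bit (f := and) (by rfl) false a true b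
  simp [Nat.bit_val] at h
  simpa [Nat.land, Nat.mul_comm] using h

lemma land_bit1_bit0 (a b : Nat) : (2*a+1) &&& (2*b) = 2*(a &&& b) := by
  have h := Nat.bitwise_bit (f := and) (by rfl) true a false b
  simp [Nat.bit_val] at h
  simpa [Nat.land, Nat.mul_comm] using h

lemma lb_odd {m : Nat} (h : m % 2 = 1) : lb m = 1 := by
  obtain ⟨a, rfl⟩ : ∃ a, m = 2*a+1 := ⟨m/2, by omega⟩
  have : (2*a+1) &&& (2*a) = 2*(a &&& a) := land_bit1_bit0 a a
  simp [Nat.and_self] at this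
  simp [lb, this]

lemma lb_even (k : Nat) (hk : 0 < k) : lb (2*k) = 2 * lb k := by
  have h1 : 2*k - 1 = 2*(k-1)+1 := by omega
  have : 2*k &&& (2*(k-1)+1) = 2*(k &&& (k-1)) := land_bit0_bit1 k (k-1)
  have hle : k &&& (k-1) ≤ k - 1 := Nat.and_le_right
  simp [lb, h1, this]
  omega

lemma lb_pos {m : Nat} (h : 0 < m) : 0 < lb m := by
  have : m &&& (m-1) ≤ m - 1 := Nat.and_le_right
  simp only [lb]; omega

lemma lb_le (m : Nat) : lb m ≤ m := by simp only [lb]; omega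

-- bridge to the port's 'i & -i'
lemma band_lowbit (m : Nat) (h : 0 < m) :
    PySem.Int.band (m : Int) (-(m : Int)) = (lb m : Int) := by
  have h0 : (0:Int) ≤ (m:Int) := by positivity
  have h1 : ¬ (0:Int) ≤ -(m:Int) := by omega
  simp [PySem.Int.band, h0, lb]
  omega

lemma lbL1 : ∀ j x : Nat, 0 < j → j - lb j < x → x < j → x + lb x ≤ j := by
  intro j
  induction j using Nat.strong_induction_on with
  | _ j ih =>
    intro x hj h1 h2
    rcases Nat.even_or_odd j with ⟨j', rfl⟩ | ⟨j', rfl⟩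
    · -- j = 2j'
      have hj' : 0 < j' := by omega
      have hlbj : lb (j' + j') = 2 * lb j' := by rw [show j' + j' = 2*j' by omega]; exact lb_even j' hj'
      rcases Nat.even_or_odd x with ⟨x', rfl⟩ | ⟨x', rfl⟩
      · have hx' : 0 < x' := by have := lb_le (j'+j'); omega
        have hlbx : lb (x' + x') = 2 * lb x' := by rw [show x' + x' = 2*x' by omega]; exact lb_even x' hx'
        have hlbj' := lb_le j'
        have := ih j' (by omega) x' (by omega) (by omega) (by omega)
        omega
      · have hlbx : lb (2*x'+1) = 1 := lb_odd (by omega)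
        omega
    · -- j odd: interval (j-1, j) empty
      have : lb (2*j'+1) = 1 := lb_odd (by omega)
      omega

lemma lbL2 : ∀ j x : Nat, 0 < x → x ≤ j - lb j → x + lb x ≤ j - lb j ∨ j < x + lb x := by
  intro j
  induction j using Nat.strong_induction_on with
  | _ j ih =>
    intro x hx h1
    have hj : 0 < j := by have := lb_le j; omega
    rcases Nat.even_or_odd j with ⟨j', rfl⟩ | ⟨j', rfl⟩
    · have hj' : 0 < j' := by omega
      have hlbj : lb (j' + j') = 2 * lb j' := by rw [show j' + j' = 2*j' by omega]; exact lb_even j' hj'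
      rcases Nat.even_or_odd x with ⟨x', rfl⟩ | ⟨x', rfl⟩
      · have hx' : 0 < x' := by omega
        have hlbx : lb (x' + x') = 2 * lb x' := by rw [show x' + x' = 2*x' by omega]; exact lb_even x' hx'
        have hlbj' := lb_le j'
        have := ih j' (by omega) x' (by omega) (by omega)
        omega
      · -- x odd: x < j - lb j strictly (x odd, j - lb j even), so x+1 ≤ j - lb j
        have hlbx : lb (2*x'+1) = 1 := lb_odd (by omega)
        have hlbj' := lb_le j'
        omega
    · -- j odd: lb j = 1; x + lb x is even hence ≠ j
      have hlbj : lb (2*j'+1) = 1 := lb_odd (by omega)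
      have heven : (x + lb x) % 2 = 0 := by
        rcases Nat.even_or_odd x with ⟨x', rfl⟩ | ⟨x', rfl⟩
        · have hx' : 0 < x' := by omega
          have : lb (x' + x') = 2 * lb x' := by rw [show x' + x' = 2*x' by omega]; exact lb_even x' hx'
          omega
        · have : lb (2*x'+1) = 1 := lb_odd (by omega)
          omega
      omega

lemma lbL3 : ∀ s q : Nat, lb (2^(s+1) * q + 2^s) = 2^s := by
  intro s
  induction s with
  | zero => intro q; exact lb_odd (by omega)
  | succ s ih =>
    intro q
    have h : 2^(s+1+1) * q + 2^(s+1) = 2 * (2^(s+1) * q + 2^s) := by ring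
    rw [h, lb_even _ (by positivity), ih q, pow_succ, Nat.mul_comm]

-- the set of Fenwick cells the add-loop starting at x touches (mirrors fenAdd's recursion)
def pathMem (n x : Int) (j : Nat) : Bool :=
  if _h1 : x ≤ n then
    if _h2 : 0 < PySem.Int.band x (-x) then
      x.toNat == j || pathMem n (x + PySem.Int.band x (-x)) j
    else false
  else false
termination_by (n + 1 - x).toNat
decreasing_by omega

lemma pathMem_le (n : Int) (j : Nat) : ∀ x : Int, pathMem n x j = true → x ≤ (j : Int) := by
  intro x
  induction x using pathMem.induct (n := n) with
  | case1 x h1 h2 ih =>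
    intro h
    rw [pathMem] at h
    simp only [h1, h2, dite_true] at h
    rcases Bool.or_eq_true_iff.mp h with h' | h'
    · have : x.toNat = j := by simpa using h'
      have := Int.self_le_toNat x
      omega
    · have := ih h'
      omega
  | case2 x h1 h2 => intro h; rw [pathMem] at h; simp [h1, h2] at h
  | case3 x h1 => intro h; rw [pathMem] at h; simp [h1] at h

-- the add-loop from x ≥ 1 touches exactly the cells j with x ≤ j ≤ n and j - lb j < x
lemma pathMem_iff (n : Int) (j : Nat) :
    ∀ x : Int, 1 ≤ x →
      (pathMem n x j = true ↔ 1 ≤ j ∧ x ≤ (j:Int) ∧ (j:Int) ≤ n ∧ (j:Int) - (lb j : Int) < x) := by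
  have fwd : ∀ x : Int, 1 ≤ x → pathMem n x j = true →
      1 ≤ j ∧ x ≤ (j:Int) ∧ (j:Int) ≤ n ∧ (j:Int) - (lb j : Int) < x := by
    intro x
    induction x using pathMem.induct (n := n) with
    | case1 x h1 h2 ih =>
      intro hx h
      have hband : PySem.Int.band x (-x) = (lb x.toNat : Int) := by
        have := band_lowbit x.toNat (by omega)
        rwa [show ((x.toNat : Nat) : Int) = x by omega] at this
      rw [pathMem] at h
      simp only [h1, h2, dite_true] at h
      rcases Bool.or_eq_true_iff.mp h with h' | h'
      · have hj : x.toNat = j := by simpa using h'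
        have hlb : 0 < lb j := lb_pos (by omega)
        refine ⟨by omega, by omega, by omega, by omega⟩
      · have hih := ih (by omega) h'
        rw [hband] at hih h'
        refine ⟨hih.1, ?_, hih.2.2.1, ?_⟩
        · have : 0 < lb x.toNat := lb_pos (by omega)
          omega
        · by_contra hcon
          -- x ≤ j - lb j (in Nat): closure lemma lbL2
          have hle : x.toNat ≤ j - lb j := by have := lb_le j; omega
          have := lbL2 j x.toNat (by omega) hle
          have hjlb := lb_le j
          rcases this with hA | hB
          · -- x + lb x ≤ j - lb j contradicts j - lb j < x + lb x
            omega
          · -- j < x + lb x contradicts x + lb x ≤ j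
            omega
    | case2 x h1 h2 => intro _ h; rw [pathMem] at h; simp [h1, h2] at h
    | case3 x h1 => intro _ h; rw [pathMem] at h; simp [h1] at h
  have bwd : ∀ d : Nat, ∀ x : Int, 1 ≤ x → ((j:Int) - x).toNat ≤ d →
      1 ≤ j → x ≤ (j:Int) → (j:Int) ≤ n → (j:Int) - (lb j : Int) < x → pathMem n x j = true := by
    intro d
    induction d with
    | zero =>
      intro x hx hd h1 h2 h3 h4
      have hxj : x = (j:Int) := by omega
      rw [pathMem]
      have hband : PySem.Int.band x (-x) = (lb x.toNat : Int) := by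
        have := band_lowbit x.toNat (by omega)
        rwa [show ((x.toNat : Nat) : Int) = x by omega] at this
      have hpos : 0 < lb x.toNat := lb_pos (by omega)
      simp only [show x ≤ n by omega, hband, dite_true, show (0:Int) < (lb x.toNat : Int) by omega]
      simp [show x.toNat = j by omega]
    | succ d ih =>
      intro x hx hd h1 h2 h3 h4
      by_cases hxj : x = (j:Int)
      · rw [pathMem]
        have hband : PySem.Int.band x (-x) = (lb x.toNat : Int) := by
          have := band_lowbit x.toNat (by omega)
          rwa [show ((x.toNat : Nat) : Int) = x by omega] at this
        have hpos : 0 < lb x.toNat := lb_pos (by omega)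
        simp only [show x ≤ n by omega, hband, dite_true, show (0:Int) < (lb x.toNat : Int) by omega]
        simp [show x.toNat = j by omega]
      · have hxlt : x < (j:Int) := by omega
        have hband : PySem.Int.band x (-x) = (lb x.toNat : Int) := by
          have := band_lowbit x.toNat (by omega)
          rwa [show ((x.toNat : Nat) : Int) = x by omega] at this
        have hpos : 0 < lb x.toNat := lb_pos (by omega)
        have hstep : x.toNat + lb x.toNat ≤ j := by
          have hjlb := lb_le j
          exact lbL1 j x.toNat (by omega) (by omega) (by omega)
        rw [pathMem]
        simp only [show x ≤ n by omega, hband, dite_true, show (0:Int) < (lb x.toNat : Int) by omega]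
        refine Bool.or_eq_true_iff.mpr (Or.inr ?_)
        exact ih (x + (lb x.toNat : Int)) (by omega) (by omega) h1 (by omega) h3 (by omega)
  intro x hx
  exact ⟨fwd x hx, fun h => bwd ((j:Int) - x).toNat x hx (le_refl _) h.1 h.2.1 h.2.2.1 h.2.2.2⟩

lemma fenAdd_length (n : Int) (v : Int) : ∀ (b : List Int) (i : Int), (fenAdd n b i v).length = b.length := by
  intro b i
  induction b, i using fenAdd.induct (n := n) (v := v) with
  | case1 b i h1 h2 ih =>
    rw [fenAdd]
    simp only [h1, h2, dite_true]
    rw [ih, PySem.List.length_pySetD]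
  | case2 b i h1 h2 => rw [fenAdd]; simp [h1, h2]
  | case3 b i h1 => rw [fenAdd]; simp [h1]

-- what one add does to every cell: add v exactly on the path of i
lemma fenAdd_getD (n : Int) (v : Int) : ∀ (b : List Int) (i : Int), 1 ≤ i → ∀ j : Nat,
    (fenAdd n b i v).getD j 0 =
      b.getD j 0 + (if pathMem n i j = true ∧ j < b.length then v else 0) := by
  intro b i
  induction b, i using fenAdd.induct (n := n) (v := v) with
  | case1 b i h1 h2 ih =>
    intro hi j
    have hset : PySem.List.pySetD b i (PySem.List.pyGetD b i 0 + v)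
        = b.set i.toNat (b.getD i.toNat 0 + v) := by
      rw [PySem.List.pySetD_of_nonneg _ _ (by omega)]
      congr 1
      rw [show i = ((i.toNat : Nat) : Int) by omega, PySem.List.pyGetD_natCast]
      have hmax : (max i 0).toNat = i.toNat := by omega
      simp [List.getD_eq_getElem?_getD, hmax]
    have hlen : (b.set i.toNat (b.getD i.toNat 0 + v)).length = b.length := by simp
    rw [fenAdd]
    simp only [h1, h2, dite_true]
    rw [ih (by omega) j, hset, hlen]
    have hpm : pathMem n i j = (i.toNat == j || pathMem n (i + PySem.Int.band i (-i)) j) := by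
      rw [pathMem]; simp [h1, h2]
    by_cases hij : i.toNat = j
    · -- the cell written now; the tail path cannot hit j again
      have htail : pathMem n (i + PySem.Int.band i (-i)) j = false := by
        by_contra hcon
        have : i + PySem.Int.band i (-i) ≤ (j:Int) :=
          pathMem_le n j _ (by simpa using hcon)
        omega
      have hj : pathMem n i j = true := by rw [hpm]; simp [hij]
      rw [List.getD_eq_getElem?_getD, List.getElem?_set, hij]
      by_cases hlt : j < b.length
      · simp only [if_pos hlt, htail, hj]
        simp [List.getD_eq_getElem?_getD, hlt]
      · simp only [if_neg hlt, htail, hj]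
        have : b[j]? = none := by rw [List.getElem?_eq_none_iff]; omega
        simp [this, List.getD_eq_getElem?_getD]
        exact fun h => absurd h hlt
    · -- a different cell: the set is invisible at j
      have hgd : (b.set i.toNat (b.getD i.toNat 0 + v)).getD j 0 = b.getD j 0 := by
        rw [List.getD_eq_getElem?_getD, List.getElem?_set, if_neg hij, ← List.getD_eq_getElem?_getD]
      rw [hgd, hpm]
      simp [hij]
  | case2 b i h1 h2 =>
    -- 0 < i & -i fails: impossible for i ≥ 1
    intro hi j
    exfalso
    have hband : PySem.Int.band i (-i) = (lb i.toNat : Int) := by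
      have := band_lowbit i.toNat (by omega)
      rwa [show ((i.toNat : Nat) : Int) = i by omega] at this
    have := lb_pos (m := i.toNat) (by omega)
    omega
  | case3 b i h1 =>
    intro hi j
    have hpm : pathMem n i j = false := by rw [pathMem]; simp [h1]
    rw [fenAdd]
    simp [h1, hpm]

-- bit array representing the multiset of still-available cow numbers L
def bitOf (n : Int) (L : List Int) : List Int :=
  L.foldl (fun b x => fenAdd n b x 1) (List.replicate (n + 1).toNat 0)

-- number of elements of L that are ≤ i
def cnt (L : List Int) (i : Int) : Int := ((L.filter (fun a => decide (a ≤ i))).length : Int)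

lemma foldl_fenAdd_length (n : Int) : ∀ (L : List Int) (b : List Int),
    (L.foldl (fun b x => fenAdd n b x 1) b).length = b.length := by
  intro L
  induction L with
  | nil => intro b; rfl
  | cons x t ih => intro b; rw [List.foldl_cons, ih, fenAdd_length]

lemma bitOf_length (n : Int) (L : List Int) : (bitOf n L).length = (n + 1).toNat :=
  (foldl_fenAdd_length n L _).trans (by simp)

lemma foldl_fenAdd_getD (n : Int) : ∀ (L : List Int) (b : List Int), (∀ x ∈ L, 1 ≤ x) → ∀ j : Nat,
    (L.foldl (fun b x => fenAdd n b x 1) b).getD j 0 =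
      b.getD j 0 + (if j < b.length then ((L.filter (fun x => pathMem n x j)).length : Int) else 0) := by
  intro L
  induction L with
  | nil => intro b _ j; simp
  | cons x t ih =>
    intro b hx j
    rw [List.foldl_cons, ih _ (fun y hy => hx y (by simp [hy])) j,
      fenAdd_getD n 1 b x (hx x (by simp)) j, fenAdd_length]
    rw [List.filter_cons]
    by_cases hp : pathMem n x j = true
    · simp only [hp]
      by_cases hlt : j < b.length <;> (simp [hlt]; try omega)
    · simp only [Bool.not_eq_true] at hp
      simp [hp]

lemma bitOf_getD (n : Int) (L : List Int) (hL : ∀ x ∈ L, 1 ≤ x ∧ x ≤ n) (j : Nat) :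
    (bitOf n L).getD j 0 =
      if 1 ≤ j ∧ (j:Int) ≤ n then
        ((L.filter (fun a => decide ((j:Int) - (lb j : Int) < a ∧ a ≤ (j:Int)))).length : Int)
      else 0 := by
  rw [bitOf, foldl_fenAdd_getD n L _ (fun x hx => (hL x hx).1) j]
  have hrep : (List.replicate (n + 1).toNat (0:Int)).getD j 0 = 0 := by
    rcases Nat.lt_or_ge j (n+1).toNat with h | h
    · simp [List.getD_eq_getElem?_getD, h]
    · have hnone : (List.replicate (n + 1).toNat (0:Int))[j]? = none := by
        rw [List.getElem?_eq_none_iff, List.length_replicate]; omega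
      simp [List.getD_eq_getElem?_getD, hnone]
  rw [hrep]
  simp only [List.length_replicate, zero_add]
  by_cases hj : 1 ≤ j ∧ (j:Int) ≤ n
  · have hlt : j < (n+1).toNat := by omega
    rw [if_pos hlt, if_pos hj]
    have hfc : L.filter (fun x => pathMem n x j)
        = L.filter (fun a => decide ((j:Int) - (lb j : Int) < a ∧ a ≤ (j:Int))) := by
      apply List.filter_congr
      intro x hx
      have h1 := (hL x hx).1
      have h2 := (hL x hx).2
      apply Bool.eq_iff_iff.mpr
      rw [pathMem_iff n j x h1]
      simp only [decide_eq_true_eq]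
      constructor
      · rintro ⟨_, a, _, c⟩; exact ⟨c, a⟩
      · rintro ⟨c, a⟩; exact ⟨hj.1, a, hj.2, c⟩
    rw [hfc]
  · rw [if_neg hj]
    by_cases hlt : j < (n+1).toNat
    · rw [if_pos hlt]
      have : L.filter (fun x => pathMem n x j) = [] := by
        apply List.filter_eq_nil_iff.mpr
        intro x hx
        simp only [Bool.not_eq_true]
        rcases Bool.eq_false_or_eq_true (pathMem n x j) with h | h
        · exfalso
          have := (pathMem_iff n j x (hL x hx).1).mp h
          exact hj ⟨this.1, this.2.2.1⟩
        · exact h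
      simp [this]
    · rw [if_neg hlt]

lemma list_ext_getD (a b : List Int) (hlen : a.length = b.length)
    (h : ∀ j : Nat, a.getD j 0 = b.getD j 0) : a = b := by
  apply List.ext_getElem hlen
  intro j h1 h2
  have := h j
  rwa [List.getD_eq_getElem?_getD, List.getD_eq_getElem?_getD,
    List.getElem?_eq_getElem h1, List.getElem?_eq_getElem h2, Option.getD_some, Option.getD_some] at this

-- removing the picked cow from the tree = the tree of the reduced set
lemma fenAdd_bitOf_erase (n : Int) (L : List Int) (hL : ∀ x ∈ L, 1 ≤ x ∧ x ≤ n)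
    (idx : Nat) (hidx : idx < L.length) :
    fenAdd n (bitOf n L) L[idx] (-1) = bitOf n (L.eraseIdx idx) := by
  have hx1 : 1 ≤ L[idx] := (hL _ (List.getElem_mem hidx)).1
  have hL' : ∀ x ∈ L.eraseIdx idx, 1 ≤ x ∧ x ≤ n := fun x hx => hL x (List.mem_of_mem_eraseIdx hx)
  apply list_ext_getD
  · rw [fenAdd_length, bitOf_length, bitOf_length]
  · intro j
    rw [fenAdd_getD n (-1) _ _ hx1 j, bitOf_getD n L hL j, bitOf_getD n _ hL' j, bitOf_length]
    have hdec : L = L.take idx ++ L[idx] :: L.drop (idx+1) := by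
      rw [List.getElem_cons_drop hidx, List.take_append_drop]
    have herase : L.eraseIdx idx = L.take idx ++ L.drop (idx+1) := List.eraseIdx_eq_take_drop_succ L idx
    have hpm := pathMem_iff n j L[idx] hx1
    set x := L[idx] with hx
    by_cases hj : 1 ≤ j ∧ (j:Int) ≤ n
    · have hjlt : j < (n+1).toNat := by omega
      rw [if_pos hj, if_pos hj, herase]
      conv_lhs => rw [hdec]
      rw [List.filter_append, List.filter_cons, List.filter_append]
      by_cases hcond : ((j:Int) - (lb j : Int) < x ∧ x ≤ (j:Int))
      · have hpmt : pathMem n x j = true := hpm.mpr ⟨hj.1, hcond.2, hj.2, hcond.1⟩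
        have hxd : (decide ((j:Int) - (lb j : Int) < x ∧ x ≤ (j:Int))) = true := by
          simpa using hcond
        simp [hpmt, hjlt, hxd, List.length_append]
        omega
      · have hxd : (decide ((j:Int) - (lb j : Int) < x ∧ x ≤ (j:Int))) = false := by
          simpa using hcond
        have hpf : pathMem n x j = false := by
          rcases Bool.eq_false_or_eq_true (pathMem n x j) with h | h
          · exact absurd ⟨(hpm.mp h).2.2.2, (hpm.mp h).2.1⟩ hcond
          · exact h
        simp [hpf, hxd, List.length_append]
    · rw [if_neg hj, if_neg hj]
      have hpf : pathMem n x j = false := by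
        rcases Bool.eq_false_or_eq_true (pathMem n x j) with h | h
        · exact absurd ⟨(hpm.mp h).1, (hpm.mp h).2.2.1⟩ hj
        · exact h
      simp [hpf]

lemma cnt_cons (a : Int) (t : List Int) (i : Int) :
    cnt (a :: t) i = cnt t i + (if a ≤ i then 1 else 0) := by
  simp only [cnt, List.filter_cons]
  by_cases h : a ≤ i <;> simp [h]

lemma cnt_mono (L : List Int) {i j : Int} (h : i ≤ j) : cnt L i ≤ cnt L j := by
  induction L with
  | nil => simp [cnt]
  | cons a t ih =>
    rw [cnt_cons, cnt_cons]
    split_ifs <;> omega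

lemma cnt_nonneg (L : List Int) (i : Int) : 0 ≤ cnt L i := by
  simp only [cnt]; positivity

lemma cnt_interval (L : List Int) (lo hi : Int) (h : lo ≤ hi) :
    ((L.filter (fun a => decide (lo < a ∧ a ≤ hi))).length : Int) = cnt L hi - cnt L lo := by
  induction L with
  | nil => simp [cnt]
  | cons a t ih =>
    rw [List.filter_cons, cnt_cons, cnt_cons]
    by_cases hp : lo < a ∧ a ≤ hi
    · rw [if_pos (by simpa using hp), List.length_cons]
      push_cast
      split_ifs <;> omega
    · rw [if_neg (by simpa using hp)]
      split_ifs <;> omega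

lemma cnt_zero_of_pos (L : List Int) (hL : ∀ x ∈ L, 1 ≤ x) : cnt L 0 = 0 := by
  simp only [cnt]
  have h2 : L.filter (fun a => decide (a ≤ (0:Int))) = [] := by
    apply List.filter_eq_nil_iff.mpr
    intro x hx
    have := hL x hx
    simp; omega
  rw [h2]; rfl

lemma cnt_all (L : List Int) (n : Int) (hL : ∀ x ∈ L, x ≤ n) : cnt L n = (L.length : Int) := by
  simp only [cnt]
  rw [List.filter_eq_self.mpr (fun x hx => by simpa using hL x hx)]

-- in a strictly increasing list, exactly idx elements are < L[idx] and idx+1 are ≤ L[idx]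
lemma cnt_getElem (L : List Int) (hs : L.Pairwise (· < ·)) :
    ∀ idx : Nat, (h : idx < L.length) →
      cnt L (L[idx] - 1) = (idx : Int) ∧ cnt L L[idx] = (idx : Int) + 1 := by
  induction L with
  | nil => intro idx h; simp at h
  | cons a t ih =>
    intro idx h
    have ha : ∀ x ∈ t, a < x := fun x hx => (List.pairwise_cons.mp hs).1 x hx
    have hst : t.Pairwise (· < ·) := (List.pairwise_cons.mp hs).2
    cases idx with
    | zero =>
      simp only [List.getElem_cons_zero]
      have h2 : cnt t (a - 1) = 0 := by
        have : t.filter (fun x => decide (x ≤ a - 1)) = [] := by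
          apply List.filter_eq_nil_iff.mpr
          intro x hx
          have := ha x hx
          simp; omega
        simp only [cnt]; rw [this]; rfl
      have h3 : cnt t a = 0 := by
        have : t.filter (fun x => decide (x ≤ a)) = [] := by
          apply List.filter_eq_nil_iff.mpr
          intro x hx
          have := ha x hx
          simp; omega
        simp only [cnt]; rw [this]; rfl
      rw [cnt_cons, cnt_cons, h2, h3]
      norm_num
    | succ idx =>
      have hlt : idx < t.length := by simpa using h
      have hmem : t[idx] ∈ t := List.getElem_mem hlt
      have hat : a < t[idx] := ha _ hmem
      have hih := ih hst idx hlt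
      simp only [List.getElem_cons_succ]
      rw [cnt_cons, cnt_cons, if_pos (by omega : a ≤ t[idx] - 1), if_pos (by omega : a ≤ t[idx]),
        hih.1, hih.2]
      push_cast
      omega

lemma cnt_locate_unique (L : List Int) (k a b : Int)
    (ha1 : cnt L (a - 1) < k) (ha2 : k ≤ cnt L a)
    (hb1 : cnt L (b - 1) < k) (hb2 : k ≤ cnt L b) : a = b := by
  by_contra hne
  rcases lt_or_gt_of_ne hne with h | h
  · have := cnt_mono L (show a ≤ b - 1 by omega)
    omega
  · have := cnt_mono L (show b ≤ a - 1 by omega)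
    omega

-- the Fenwick cell read during the descent: i a multiple of 2^(s+1), cell i + 2^s covers (i, i+2^s]
lemma bit_val (n : Int) (L : List Int) (hL : ∀ x ∈ L, 1 ≤ x ∧ x ≤ n)
    (i : Int) (s : Nat) (hi0 : 0 ≤ i) (hdvd : ((2:Int)^(s+1)) ∣ i) (hn : i + 2^s ≤ n) :
    PySem.List.pyGetD (bitOf n L) (i + 2^s) 0 = cnt L (i + 2^s) - cnt L i := by
  obtain ⟨q, hq⟩ := hdvd
  have h2p : (0:Int) < 2^(s+1) := by positivity
  have h2s : (0:Int) < 2^s := by positivity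
  have hq0 : 0 ≤ q := by
    by_cases hc : 0 ≤ q
    · exact hc
    · have := mul_neg_of_pos_of_neg h2p (by omega : q < 0)
      omega
  set j : Nat := (i + 2^s).toNat with hj
  have heq : ((j:Nat):Int) = i + 2^s := by omega
  have hjn : j = 2^(s+1) * q.toNat + 2^s := by
    have hcast : ((2^(s+1) * q.toNat + 2^s : Nat) : Int) = 2^(s+1) * q + 2^s := by
      push_cast [Int.toNat_of_nonneg hq0]
      ring
    omega
  have hlb : lb j = 2^s := by rw [hjn]; exact lbL3 s q.toNat
  have hlbc : ((lb j : Nat) : Int) = 2^s := by rw [hlb]; push_cast; ring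
  rw [show i + (2:Int)^s = ((j:Nat):Int) from heq.symm, PySem.List.pyGetD_natCast,
    show ∀ d : Int, (bitOf n L).getD j d = (bitOf n L).getD j d from fun _ => rfl]
  rw [bitOf_getD n L hL j, if_pos (by constructor <;> omega)]
  have hfc : (L.filter (fun a => decide ((j:Int) - (lb j : Int) < a ∧ a ≤ (j:Int))))
      = L.filter (fun a => decide (i < a ∧ a ≤ i + 2^s)) := by
    apply List.filter_congr
    intro x _
    rw [heq, hlbc]
    simp only [add_sub_cancel_right]
  rw [hfc, cnt_interval L i (i + 2^s) (by omega), heq]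

-- the binary descent of pick_kth homes in on the unique r with cnt (r-1) < k0 ≤ cnt r
lemma pickGo_correct (n : Int) (L : List Int) (hL : ∀ x ∈ L, 1 ≤ x ∧ x ≤ n)
    (k0 r : Int) (hr1 : cnt L (r - 1) < k0) (hr2 : k0 ≤ cnt L r) :
    ∀ s : Nat, ∀ i : Int, 0 ≤ i → i ≤ n → ((2:Int)^(s+1)) ∣ i →
      cnt L i < k0 → k0 ≤ cnt L (min n (i + 2^(s+1))) →
      fenPickGo n (bitOf n L) (2^s) i (k0 - cnt L i) = r := by
  intro s
  induction s with
  | zero =>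
    intro i hi0 hin hdvd hlt hub
    simp only [pow_zero]
    rw [fenPickGo, dif_neg one_ne_zero]
    simp only [Nat.cast_one]
    by_cases hnn : i + 1 ≤ n
    · have hbv : PySem.List.pyGetD (bitOf n L) (i + 1) 0 = cnt L (i + 1) - cnt L i := by
        have := bit_val n L hL i 0 hi0 (by simpa using hdvd) (by simpa using hnn)
        simpa using this
      by_cases hblt : cnt L (i + 1) < k0
      · rw [if_pos ⟨hnn, by rw [hbv]; omega⟩]
        rw [show (1:Nat)/2 = 0 from rfl, fenPickGo, dif_pos rfl]
        -- returns i + 2; identify with r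
        rcases le_or_gt (i + 2) n with hc | hc
        · have hmin : min n (i + 2^(0+1)) = i + 2 := by
            rw [min_eq_right]
            · norm_num
            · norm_num; omega
          rw [hmin] at hub
          have := cnt_locate_unique L k0 r (i + 2) hr1 hr2 (by rw [show i + 2 - 1 = i + 1 by ring]; exact hblt) hub
          omega
        · have hn : n = i + 1 := by omega
          have hmin : min n (i + 2^(0+1)) = n := by
            rw [min_eq_left]
            norm_num
            omega
          rw [hmin, hn] at hub
          omega
      · rw [if_neg (by intro hc; rw [hbv] at hc; omega)]
        rw [show (1:Nat)/2 = 0 from rfl, fenPickGo, dif_pos rfl]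
        have := cnt_locate_unique L k0 r (i + 1) hr1 hr2 (by simpa using hlt) (by omega)
        omega
    · exfalso
      have hmin : min n (i + 2^(0+1)) = n := by
        rw [min_eq_left]
        norm_num
        omega
      rw [hmin] at hub
      have := cnt_mono L (show n ≤ i by omega)
      have := cnt_nonneg L i
      omega
  | succ s ih =>
    intro i hi0 hin hdvd hlt hub
    have hstep2 : (2:Nat)^(s+1) ≠ 0 := by positivity
    have hc : ((2^(s+1):Nat):Int) = (2:Int)^(s+1) := by push_cast; ring
    have hdiv2 : (2:Nat)^(s+1) / 2 = 2^s := by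
      rw [pow_succ, Nat.mul_div_cancel]
      omega
    have hpow2 : (2:Int)^(s+1+1) = 2^(s+1) + 2^(s+1) := by ring
    have hdvd' : ((2:Int)^(s+1)) ∣ i := dvd_trans (pow_dvd_pow 2 (by omega)) hdvd
    rw [fenPickGo, dif_neg hstep2]
    by_cases hnn : i + (2:Int)^(s+1) ≤ n
    · have hbv : PySem.List.pyGetD (bitOf n L) (i + ((2^(s+1):Nat):Int)) 0
          = cnt L (i + 2^(s+1)) - cnt L i := by
        rw [hc]
        exact bit_val n L hL i (s+1) hi0 hdvd hnn
      by_cases hblt : cnt L (i + 2^(s+1)) < k0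
      · rw [if_pos ⟨by rw [hc]; exact hnn, by rw [hbv]; omega⟩]
        rw [hdiv2, hbv, hc,
          show k0 - cnt L i - (cnt L (i + 2^(s+1)) - cnt L i) = k0 - cnt L (i + 2^(s+1)) by ring]
        apply ih (i + 2^(s+1)) (by positivity) hnn
          (dvd_add hdvd' dvd_rfl) hblt
        rw [show i + 2^(s+1) + 2^(s+1) = i + 2^(s+1+1) by rw [hpow2]; ring]
        exact hub
      · rw [if_neg (by intro hcon; rw [hbv] at hcon; omega)]
        rw [hdiv2]
        apply ih i hi0 hin hdvd' hlt
        rw [min_eq_right hnn]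
        omega
    · rw [if_neg (by intro hcon; rw [hc] at hcon; exact hnn hcon.1)]
      rw [hdiv2]
      apply ih i hi0 hin hdvd' hlt
      have h1 : min n (i + 2^(s+1+1)) = n := by
        rw [min_eq_left]
        have : (0:Int) < 2^(s+1) := by positivity
        omega
      have h2 : min n (i + 2^(s+1)) = n := by
        rw [min_eq_left]
        omega
      rw [h2, ← h1]
      exact hub

lemma fenPick_correct (n : Int) (L : List Int) (hL : ∀ x ∈ L, 1 ≤ x ∧ x ≤ n)
    (hs : L.Pairwise (· < ·)) (hn : 1 ≤ n) (idx : Nat) (hidx : idx < L.length) :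
    fenPick n (bitOf n L) ((idx : Int) + 1) = L[idx] := by
  have hbl1 : 1 ≤ PySem.Int.bitLength n := by
    by_contra hbl
    have hlt := PySem.Int.lt_two_pow_bitLength n
    have h0 : PySem.Int.bitLength n = 0 := by omega
    rw [h0] at hlt
    simp at hlt
    omega
  set s : Nat := PySem.Int.bitLength n - 1 with hsdef
  have hs1 : s + 1 = PySem.Int.bitLength n := by omega
  have hub : n.natAbs < 2^(s+1) := by rw [hs1]; exact PySem.Int.lt_two_pow_bitLength n
  have hcnt := cnt_getElem L hs idx hidx
  have hk1 : cnt L (L[idx] - 1) < (idx:Int) + 1 := by rw [hcnt.1]; omega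
  have hk2 : (idx:Int) + 1 ≤ cnt L L[idx] := by rw [hcnt.2]
  have hmain := pickGo_correct n L hL ((idx:Int) + 1) L[idx] hk1 hk2 s 0 le_rfl (by omega)
    (dvd_zero _) (by rw [cnt_zero_of_pos L (fun x hx => (hL x hx).1)]; omega)
    (by
      have hcast : ((2^(s+1):Nat):Int) = (2:Int)^(s+1) := by push_cast; ring
      have hub' : ((n.natAbs : Nat) : Int) < ((2^(s+1):Nat):Int) := by exact_mod_cast hub
      rw [hcast] at hub'
      have hminn : min n ((0:Int) + 2^(s+1)) = n := by
        rw [min_eq_left]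
        omega
      rw [hminn, cnt_all L n (fun x hx => (hL x hx).2)]
      omega)
  rw [fenPick, show (1:Nat) <<< (PySem.Int.bitLength n - 1) = 2^s by simp [Nat.shiftLeft_eq, hsdef]]
  rw [cnt_zero_of_pos L (fun x hx => (hL x hx).1)] at hmain
  simpa using hmain

lemma set_replicate_last (k : Nat) (a x : Int) (t : List Int) :
    (List.replicate (k+1) a ++ t).set k x = List.replicate k a ++ x :: t := by
  induction k with
  | zero => simp
  | succ k ih =>
    rw [List.replicate_succ, List.cons_append, List.set_cons_succ, ih,
      List.replicate_succ, List.cons_append]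

-- the coupled loop: A's Fenwick state is bitOf of B's available list, and A's answer array
-- holds the already-filled tail while B's picked list holds it reversed
lemma loop_eq (n : Int) (before : List Int) :
    ∀ d : Nat, ∀ p : Int, d = (p+1).toNat → -1 ≤ p → p < n →
    ∀ (L : List Int) (picked : List Int) (ansA : List Int),
      (∀ x ∈ L, 1 ≤ x ∧ x ≤ n) → L.Pairwise (· < ·) → L.length = (p+1).toNat →
      (∀ pos : Int, 0 ≤ pos → pos ≤ p →
        0 ≤ PySem.List.pyGetD before pos 0 ∧ PySem.List.pyGetD before pos 0 ≤ pos) →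
      ansA = List.replicate (p+1).toNat 0 ++ picked.reverse →
      ((PySem.List.pyRange p (-1) (-1)).foldl (stepA n before) (bitOf n L, ansA)).2
        = ((PySem.List.pyRange p (-1) (-1)).foldl (stepB before) (L, picked)).2.reverse := by
  intro d
  induction d with
  | zero =>
    intro p hd hp1 hp2 L picked ansA hL hs hlen hB hans
    have hp : p = -1 := by omega
    subst hp
    rw [PySem.List.pyRange_neg_one_eq_nil le_rfl]
    simp only [List.foldl_nil]
    simpa using hans
  | succ e ih =>
    intro p hd hp1 hp2 L picked ansA hL hs hlen hB hans
    have hp0 : 0 ≤ p := by omega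
    rw [PySem.List.pyRange_neg_one_cons (by omega : (-1:Int) < p)]
    simp only [List.foldl_cons]
    -- the count at position p
    have hc := hB p hp0 le_rfl
    set c : Int := PySem.List.pyGetD before p 0 with hcdef
    set idx : Nat := c.toNat with hidxdef
    have hidx : idx < L.length := by rw [hlen]; omega
    have hcn : c = ((idx : Nat) : Int) := by omega
    -- B's step
    have hpop : PySem.List.pop? L c = some (L[idx], L.eraseIdx idx) := by
      rw [hcn]; exact PySem.List.pop?_natCast L idx hidx
    have hstepB : stepB before (L, picked) p = (L.eraseIdx idx, picked ++ [L[idx]]) := by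
      rw [stepB]
      simp only [← hcdef, hpop]
    -- A's step
    have hn1 : 1 ≤ n := by omega
    have hpick : fenPick n (bitOf n L) (c + 1) = L[idx] := by
      rw [hcn]; exact fenPick_correct n L hL hs hn1 idx hidx
    have herase : fenAdd n (bitOf n L) L[idx] (-1) = bitOf n (L.eraseIdx idx) :=
      fenAdd_bitOf_erase n L hL idx hidx
    have hsetans : PySem.List.pySetD ansA p L[idx]
        = List.replicate p.toNat 0 ++ (picked ++ [L[idx]]).reverse := by
      rw [PySem.List.pySetD_of_nonneg _ _ hp0, hans]
      have : (p+1).toNat = p.toNat + 1 := by omega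
      rw [this, set_replicate_last]
      simp
    have hstepA : stepA n before (bitOf n L, ansA)  p
        = (bitOf n (L.eraseIdx idx), List.replicate p.toNat 0 ++ (picked ++ [L[idx]]).reverse) := by
      rw [stepA]
      simp only [← hcdef, hpick, herase, hsetans]
    rw [hstepA, hstepB]
    -- invariants for the reduced state
    have hL' : ∀ x ∈ L.eraseIdx idx, 1 ≤ x ∧ x ≤ n := fun x hx => hL x (List.mem_of_mem_eraseIdx hx)
    have hs' : (L.eraseIdx idx).Pairwise (· < ·) := hs.sublist (List.eraseIdx_sublist L idx)
    have hlen' : (L.eraseIdx idx).length = ((p-1)+1).toNat := by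
      rw [List.length_eraseIdx_of_lt hidx, hlen]
      omega
    have hB' : ∀ pos : Int, 0 ≤ pos → pos ≤ p - 1 →
        0 ≤ PySem.List.pyGetD before pos 0 ∧ PySem.List.pyGetD before pos 0 ≤ pos :=
      fun pos h1 h2 => hB pos h1 (by omega)
    have := ih (p-1) (by omega) (by omega) (by omega) (L.eraseIdx idx) (picked ++ [L[idx]])
      (List.replicate p.toNat 0 ++ (picked ++ [L[idx]]).reverse) hL' hs' hlen' hB'
      (by rw [show ((p-1)+1).toNat = p.toNat by omega])
    simpa using this

lemma main_fold (n : Int) (before : List Int)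
    (hB : ∀ pos : Int, 0 ≤ pos → pos ≤ n - 1 →
      0 ≤ PySem.List.pyGetD before pos 0 ∧ PySem.List.pyGetD before pos 0 ≤ pos) :
    ((PySem.List.pyRange (n-1) (-1) (-1)).foldl (stepA n before)
        ((PySem.List.pyRange 1 (n+1) 1).foldl (fun b number => fenAdd n b number 1)
          (List.replicate (n+1).toNat 0),
         List.replicate n.toNat 0)).2
    = ((PySem.List.pyRange (n-1) (-1) (-1)).foldl (stepB before)
        (PySem.List.pyRange 1 (n+1) 1, ([] : List Int))).2.reverse := by
  rcases le_or_gt n 0 with hn | hn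
  · rw [PySem.List.pyRange_neg_one_eq_nil (by omega)]
    simp only [List.foldl_nil]
    rw [show n.toNat = 0 by omega]
    simp
  · have h := loop_eq n before ((n-1)+1).toNat (n-1) rfl (by omega) (by omega)
      (PySem.List.pyRange 1 (n+1) 1) [] (List.replicate n.toNat 0)
      (fun x hx => by have := (PySem.List.mem_pyRange_one).mp hx; omega)
      (PySem.List.pairwise_lt_pyRange_one 1 (n+1))
      (by rw [PySem.List.length_pyRange_one]; omega)
      hB
      (by rw [show ((n-1)+1).toNat = n.toNat by omega]; simp)
    simp only [bitOf] at h
    exact h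

lemma main_eq (data : String) (hpre : preB data = true) : solve data = solve_alt data := by
  rw [solve, solve_alt]
  by_cases hp : PySem.Str.split₀ data = []
  · rw [if_pos hp, if_pos hp]
  · rw [if_neg hp, if_neg hp]
    rw [preB] at hpre
    set parts := PySem.Str.split₀ data with hparts
    rw [List.isEmpty_eq_false_iff_exists_mem.mpr
      (by rcases List.exists_mem_of_ne_nil parts hp with ⟨x, hx⟩; exact ⟨x, hx⟩)] at hpre
    cases hm : PySem.Int.ofStr? (parts.getD 0 "") with
    | none => rw [hm] at hpre; simp at hpre
    | some n0 =>
      rw [hm] at hpre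
      simp only [Bool.false_or, Bool.and_eq_true, decide_eq_true_eq, List.all_eq_true] at hpre
      obtain ⟨hlen, hall⟩ := hpre
      simp only [Option.getD_some]
      -- bounds for every used count
      have hB : ∀ pos : Int, 0 ≤ pos → pos ≤ n0 - 1 →
          0 ≤ PySem.List.pyGetD
              (0 :: (PySem.List.slice parts (some 1) (some (1 + max 0 (n0 - 1)))).map
                (fun s => (PySem.Int.ofStr? s).getD 0)) pos 0 ∧
            PySem.List.pyGetD
              (0 :: (PySem.List.slice parts (some 1) (some (1 + max 0 (n0 - 1)))).map
                (fun s => (PySem.Int.ofStr? s).getD 0)) pos 0 ≤ pos := by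
        intro pos h0 h1
        rcases eq_or_lt_of_le h0 with h00 | h01
        · rw [← h00, PySem.List.pyGetD_zero_cons]
          omega
        · -- pos ≥ 1
          have hmax : 1 + max 0 (n0 - 1) = n0 := by omega
          have hptn : (pos.toNat : Int) = pos := by omega
          have hlt : pos.toNat < parts.length := by omega
          have hcount := hall pos (PySem.List.mem_pyRange_one.mpr ⟨by omega, by omega⟩)
          rw [show parts.getD pos.toNat "" = parts[pos.toNat] from
            by rw [List.getD_eq_getElem?_getD, List.getElem?_eq_getElem hlt, Option.getD_some]] at hcount
          cases hm2 : PySem.Int.ofStr? parts[pos.toNat] with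
          | none => rw [hm2] at hcount; simp at hcount
          | some c =>
            rw [hm2] at hcount
            simp only [Bool.and_eq_true, decide_eq_true_eq] at hcount
            have hval : PySem.List.pyGetD
                (0 :: (PySem.List.slice parts (some 1) (some (1 + max 0 (n0 - 1)))).map
                  (fun s => (PySem.Int.ofStr? s).getD 0)) pos 0 = c := by
              rw [← hptn, PySem.List.pyGetD_natCast]
              rw [show pos.toNat = (pos.toNat - 1) + 1 by omega, List.getD_cons_succ]
              rw [hmax, PySem.List.slice_toNat parts (by omega) (by omega)]
              rw [List.getD_eq_getElem?_getD, List.getElem?_map]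
              rw [show ((1:Int).toNat) = 1 from rfl]
              rw [List.getElem?_take_of_lt (by omega : pos.toNat - 1 < n0.toNat - 1),
                List.getElem?_drop, show 1 + (pos.toNat - 1) = pos.toNat by omega,
                List.getElem?_eq_getElem hlt]
              simp [hm2]
            rw [hval]
            omega
      rw [main_fold n0 _ hB]

-- ===== VERDICT (by name: the statement is the Claim_ definition above) =====
theorem solve_spec : Claim_equal_solve := by
  intro data _ hpre
  unfold Pre_solve at hpre
  unfold Spec_solve
  exact main_eq data hpre
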